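-- pv_equiv track=rewrite | github.com/jgfranco/formation | 2023_11/matrixSpeedDrill4.py | solution
-- ===== SOURCE A (Python) =====
-- def solution(m):
--     mid = len(m)//2
--
--     sum = 0
--     for row in range(len(m)):
--         for col in range(len(m[0])):
--
--             if row == mid or col == mid:
--                 sum += m[row][col]
--
--
--     return sum
-- ===== SOURCE B (Python) =====
-- def solution(m):
--     mid = len(m) // 2
--     c = len(m[0])
--     total = sum(m[mid][:c])
--     if mid < c:
--         total += sum(row[mid] for row in m) - m[mid][mid]
--     return total
-- ===== Notes on version B (the rewrite author's own statement) =====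
-- stated objective: faster
-- what changed: Replaces the full O(n*m) scan of every cell with direct summation of the middle row plus the middle column, subtracting the intersection cell once.
-- outside the precondition, e.g. on solution([]): A returns 0, B raises IndexError
import Mathlib
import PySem

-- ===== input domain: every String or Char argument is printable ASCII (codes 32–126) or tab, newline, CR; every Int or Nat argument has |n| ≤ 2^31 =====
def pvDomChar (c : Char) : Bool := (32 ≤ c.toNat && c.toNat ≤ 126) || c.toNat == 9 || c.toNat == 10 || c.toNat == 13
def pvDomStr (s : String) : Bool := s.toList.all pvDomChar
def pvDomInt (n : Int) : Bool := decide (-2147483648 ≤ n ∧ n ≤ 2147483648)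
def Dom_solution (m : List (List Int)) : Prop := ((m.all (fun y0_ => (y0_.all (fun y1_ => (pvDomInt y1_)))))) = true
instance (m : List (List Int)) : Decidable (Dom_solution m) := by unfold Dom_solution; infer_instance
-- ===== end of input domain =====

-- B sums the middle row and the middle column directly (subtracting the shared cell),
-- instead of A's scan over every cell of the matrix.

-- ===== PORT A =====
-- literal port of A's nested range loops; m[row][col] via getD (Pre_ keeps every access in range)
def solution (m : List (List Int)) : Int :=
  let mid := m.length / 2
  (List.range m.length).foldl (fun s row =>
    (List.range m.headI.length).foldl (fun s col =>
      if row = mid ∨ col = mid then s + ((m.getD row []).getD col 0) else s) s) 0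

-- ===== PORT B =====
def solution_alt (m : List (List Int)) : Int :=
  let mid := m.length / 2
  let c := m.headI.length
  let total := ((m.getD mid []).take c).sum
  if mid < c then total + (m.map (fun row => row.getD mid 0)).sum - (m.getD mid []).getD mid 0
  else total

-- ===== PRECONDITION & SPEC =====
-- Pre_ excludes exactly the inputs where Python A raises IndexError (a middle row shorter
-- than the first row, or, when the middle column index falls inside the first row, any row
-- not reaching it) and the empty matrix, where A's 0 is an accident of its loops never
-- running while B's natural m[0] lookup raises.
def Pre_solution (m : List (List Int)) : Prop :=
  m ≠ [] ∧ m.headI.length ≤ (m.getD (m.length / 2) []).length ∧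
    (m.length / 2 < m.headI.length → ∀ r ∈ m, m.length / 2 < r.length)
instance (m : List (List Int)) : Decidable (Pre_solution m) := by unfold Pre_solution; infer_instance

def pvWitness_solution : List (List Int) := [[1, 2, 3], [4, 5, 6], [7, 8, 9]]

def Spec_solution (m : List (List Int)) (out : Int) : Prop := out = solution_alt m
instance (m : List (List Int)) (out : Int) : Decidable (Spec_solution m out) := by unfold Spec_solution; infer_instance

-- ===== CLAIM (what is proved, stated in full; the proofs are below) =====
def Claim_equal_solution : Prop := ∀ (m : List (List Int)), Dom_solution m → Pre_solution m → Spec_solution m (solution m)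

-- ===== LEMMAS AND PROOFS =====

-- a foldl that only accumulates is a Finset sum
lemma foldl_range_add (f : Nat → Int) (k : Nat) (s : Int) :
    (List.range k).foldl (fun s i => s + f i) s = s + ∑ i ∈ Finset.range k, f i := by
  induction k with
  | zero => simp
  | succ k ih =>
    rw [List.range_succ, List.foldl_append, ih, Finset.sum_range_succ]
    simp [add_assoc]

lemma sum_take_eq (l : List Int) (c : Nat) :
    (l.take c).sum = ∑ i ∈ Finset.range c, l.getD i 0 := by
  induction c with
  | zero => simp
  | succ c ih =>
    rw [Finset.sum_range_succ, ← ih, List.take_add_one, List.sum_append]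
    cases h : l[c]? <;> simp [List.getD, h]

lemma sum_map_eq (m : List (List Int)) (mid : Nat) :
    (m.map (fun r => r.getD mid 0)).sum = ∑ row ∈ Finset.range m.length, (m.getD row []).getD mid 0 := by
  induction m with
  | nil => simp
  | cons a t ih =>
    rw [List.map_cons, List.sum_cons, ih, List.length_cons, Finset.sum_range_succ']
    simp [add_comm]

lemma solution_eq_alt (m : List (List Int)) : solution m = solution_alt m := by
  unfold solution solution_alt
  dsimp only
  cases m with
  | nil => simp
  | cons a t =>
    set mid := (a :: t).length / 2 with hmid
    set c := (a :: t).headI.length with hc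
    set A : Nat → Nat → Int := fun row col => (((a :: t).getD row []).getD col 0) with hA
    have hmidlt : mid < (a :: t).length := by
      simp only [hmid, List.length_cons]; omega
    -- inner loop as a sum
    have hinner : ∀ (row : Nat) (s : Int),
        (List.range c).foldl (fun s col => if row = mid ∨ col = mid then s + A row col else s) s
          = s + ∑ col ∈ Finset.range c, (if row = mid ∨ col = mid then A row col else 0) := by
      intro row s
      have : (fun (s : Int) col => if row = mid ∨ col = mid then s + A row col else s)
           = (fun (s : Int) col => s + (if row = mid ∨ col = mid then A row col else 0)) := by
        funext s col; split <;> simp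
      rw [this, foldl_range_add]
    -- the whole double loop as a double sum
    have houter :
        (List.range (a :: t).length).foldl (fun s row =>
          (List.range c).foldl (fun s col => if row = mid ∨ col = mid then s + A row col else s) s) 0
        = ∑ row ∈ Finset.range (a :: t).length, ∑ col ∈ Finset.range c,
            (if row = mid ∨ col = mid then A row col else 0) := by
      have : (fun (s : Int) row =>
          (List.range c).foldl (fun s col => if row = mid ∨ col = mid then s + A row col else s) s)
        = (fun (s : Int) row => s + ∑ col ∈ Finset.range c,
            (if row = mid ∨ col = mid then A row col else 0)) := by
        funext s row; exact hinner row s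
      rw [this, foldl_range_add, zero_add]
    rw [houter, sum_take_eq, sum_map_eq]
    -- evaluate each row's inner sum
    have hrow : ∀ row ∈ Finset.range (a :: t).length,
        (∑ col ∈ Finset.range c, (if row = mid ∨ col = mid then A row col else 0))
        = (if row = mid then (∑ col ∈ Finset.range c, A mid col)
             - (if mid < c then A mid mid else 0) else 0)
          + (if mid < c then A row mid else 0) := by
      intro row _
      by_cases hr : row = mid
      · rw [hr]
        have h1 : (∑ col ∈ Finset.range c, (if mid = mid ∨ col = mid then A mid col else 0))
             = ∑ col ∈ Finset.range c, A mid col := by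
          apply Finset.sum_congr rfl; intro col _; simp
        rw [h1, if_pos rfl]; ring
      · have : (∑ col ∈ Finset.range c, (if row = mid ∨ col = mid then A row col else 0))
             = ∑ col ∈ Finset.range c, (if col = mid then A row col else 0) := by
          apply Finset.sum_congr rfl; intro col _
          by_cases hcol : col = mid <;> simp [hr, hcol]
        rw [this, Finset.sum_ite_eq' (Finset.range c) mid (fun col => A row col)]
        simp [hr, Finset.mem_range]
    rw [Finset.sum_congr rfl hrow, Finset.sum_add_distrib,
        Finset.sum_ite_eq' (Finset.range (a :: t).length) mid, if_pos (Finset.mem_range.mpr hmidlt)]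
    have hsum2 : (∑ row ∈ Finset.range (a :: t).length, (if mid < c then A row mid else 0))
        = if mid < c then ∑ row ∈ Finset.range (a :: t).length, A row mid else 0 := by
      split <;> simp
    rw [hsum2]
    split_ifs with hmc
    · simp only [hA, List.getD]; ring
    · simp only [hA, List.getD]; ring

-- ===== VERDICT (by name: the statement is the Claim_ definition above) =====
theorem solution_spec : Claim_equal_solution := by
  intro m _ _
  unfold Spec_solution
  exact solution_eq_alt m
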